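-- pv_equiv track=rewrite | github.com/afarzam/FarsiTwitter_code | export_nws.py | get_node_t0
-- ===== SOURCE A (Python) =====
-- import collections
--
-- def get_node_t0(clstr_uid_bom_tt,
--                 retweet=False,
--                 save=False, words=[]):
--
--     node_ts = collections.defaultdict(list)
--     dump = [node_ts[str(uid)].append(time_txt[0]) \
--             for (clstr, uid, bom, tt) in clstr_uid_bom_tt \
--                 for time_txt in tt]
--
--     if (retweet): # those retweeted from might never appear in the nodes
--         dump = [node_ts[str(uid0)].append(tstamp) \
--                 for (clstr, uid1, bom1, tt) in clstr_uid_bom_tt \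
--                     for (tstamp, uid0, txt) in tt]
--     del dump
--
--     node_t0s = {uid: min(node_ts[uid]) for uid in node_ts}
--
--     return node_t0s
-- ===== SOURCE B (Python) =====
-- def get_node_t0(clstr_uid_bom_tt,
--                 retweet=False,
--                 save=False, words=[]):
--     # Flatten everything into one (key, timestamp) event stream first,
--     # then a single flat fold keeps one scalar running minimum per key.
--     events = [(str(uid), time_txt[0])
--               for (clstr, uid, bom, tt) in clstr_uid_bom_tt
--               for time_txt in tt]
--     if retweet:
--         events += [(str(uid0), tstamp)
--                    for (clstr, uid1, bom1, tt) in clstr_uid_bom_tt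
--                    for (tstamp, uid0, txt) in tt]
--     t0 = {}
--     for k, v in events:
--         m = t0.get(k)
--         if m is None or v < m:
--             t0[k] = v
--     return t0
-- ===== Notes on version B (the rewrite author's own statement) =====
-- stated objective: simpler
-- what changed: B flattens the input into one explicit (key, timestamp) event stream (appending the retweet events when requested) and then does a single flat fold keeping one scalar running minimum per key, instead of A's nested comprehensions that append into per-key lists followed by a second min-per-key pass.
import Mathlib
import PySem

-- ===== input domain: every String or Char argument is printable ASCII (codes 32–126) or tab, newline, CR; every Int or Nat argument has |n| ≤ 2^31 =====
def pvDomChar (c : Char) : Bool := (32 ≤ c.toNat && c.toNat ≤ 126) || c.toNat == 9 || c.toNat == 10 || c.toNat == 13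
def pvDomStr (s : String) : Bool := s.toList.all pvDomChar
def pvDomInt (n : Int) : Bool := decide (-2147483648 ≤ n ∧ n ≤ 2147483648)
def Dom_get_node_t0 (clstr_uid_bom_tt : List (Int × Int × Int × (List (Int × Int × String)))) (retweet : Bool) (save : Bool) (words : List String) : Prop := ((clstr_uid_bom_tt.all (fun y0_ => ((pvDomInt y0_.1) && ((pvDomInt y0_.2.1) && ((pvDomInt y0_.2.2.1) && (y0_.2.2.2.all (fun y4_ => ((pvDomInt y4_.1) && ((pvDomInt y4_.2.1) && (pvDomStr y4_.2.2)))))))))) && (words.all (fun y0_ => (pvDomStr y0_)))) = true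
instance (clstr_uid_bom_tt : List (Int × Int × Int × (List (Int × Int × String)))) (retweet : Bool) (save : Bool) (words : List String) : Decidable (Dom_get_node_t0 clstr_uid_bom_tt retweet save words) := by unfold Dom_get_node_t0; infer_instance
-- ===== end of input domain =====

-- B flattens the input to one explicit event stream and folds a scalar running minimum per
-- key over it, instead of A's build-lists-per-key-then-min two phases (objective: simpler).

-- ===== PORT A =====
-- Python's min() over a nonempty int list: keep current, replace when item < current.
-- (The [] branch is unreachable in get_node_t0: every list in node_ts was created by an append.)
def pyMin (l : List Int) : Int :=
  match l with
  | [] => 0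
  | x :: xs => xs.foldl (fun m v => if v < m then v else m) x

def get_node_t0 (clstr_uid_bom_tt : List (Int × Int × Int × (List (Int × Int × String)))) (retweet : Bool) (save : Bool) (words : List String) : List (String × Int) :=
  -- node_ts = defaultdict(list); first comprehension appends time_txt[0] under str(uid)
  let node_ts : PySem.Dict String (List Int) :=
    clstr_uid_bom_tt.foldl
      (fun d r => r.2.2.2.foldl
        (fun d tx => d.modify (PySem.Int.toStr r.2.1) [] (· ++ [tx.1])) d)
      PySem.Dict.empty
  -- if retweet: second comprehension appends tstamp under str(uid0)
  let node_ts : PySem.Dict String (List Int) :=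
    if retweet then
      clstr_uid_bom_tt.foldl
        (fun d r => r.2.2.2.foldl
          (fun d tr => d.modify (PySem.Int.toStr tr.2.1) [] (· ++ [tr.1])) d)
        node_ts
    else node_ts
  -- {uid: min(node_ts[uid]) for uid in node_ts}
  node_ts.keys.map (fun uid => (uid, pyMin (node_ts.getD uid [])))

-- ===== PORT B =====
-- one event of the flat stream: set the key if absent, else keep the smaller via strict <
def bStep (d : PySem.Dict String Int) (k : String) (v : Int) : PySem.Dict String Int :=
  match d.get? k with
  | none => d.insert k v
  | some m => if v < m then d.insert k v else d

def get_node_t0_alt (clstr_uid_bom_tt : List (Int × Int × Int × (List (Int × Int × String)))) (retweet : Bool) (save : Bool) (words : List String) : List (String × Int) :=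
  -- events = [(str(uid), time_txt[0]) …]
  let events : List (String × Int) :=
    clstr_uid_bom_tt.flatMap (fun r => r.2.2.2.map (fun tx => (PySem.Int.toStr r.2.1, tx.1)))
  -- if retweet: events += [(str(uid0), tstamp) …]
  let events : List (String × Int) :=
    if retweet then
      events ++ clstr_uid_bom_tt.flatMap (fun r => r.2.2.2.map (fun tr => (PySem.Int.toStr tr.2.1, tr.1)))
    else events
  -- for k, v in events: running minimum
  (events.foldl (fun d p => bStep d p.1 p.2) (PySem.Dict.empty : PySem.Dict String Int)).items

-- ===== PRECONDITION & SPEC =====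
def Spec_get_node_t0 (clstr_uid_bom_tt : List (Int × Int × Int × (List (Int × Int × String)))) (retweet : Bool) (save : Bool) (words : List String) (out : List (String × Int)) : Prop := out = get_node_t0_alt clstr_uid_bom_tt retweet save words
instance (clstr_uid_bom_tt : List (Int × Int × Int × (List (Int × Int × String)))) (retweet : Bool) (save : Bool) (words : List String) (out : List (String × Int)) : Decidable (Spec_get_node_t0 clstr_uid_bom_tt retweet save words out) := by unfold Spec_get_node_t0; infer_instance

-- ===== CLAIM (what is proved, stated in full; the proofs are below) =====
def Claim_equal_get_node_t0 : Prop := ∀ (clstr_uid_bom_tt : List (Int × Int × Int × (List (Int × Int × String)))) (retweet : Bool) (save : Bool) (words : List String), Dom_get_node_t0 clstr_uid_bom_tt retweet save words → Spec_get_node_t0 clstr_uid_bom_tt retweet save words (get_node_t0 clstr_uid_bom_tt retweet save words)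

-- ===== LEMMAS AND PROOFS =====

-- A's nested fold over rows equals a flat fold over the flattened (key, value) stream
theorem a_pass (rows : List (Int × Int × Int × (List (Int × Int × String))))
    (key : (Int × Int × Int × (List (Int × Int × String))) → (Int × Int × String) → String)
    (d : PySem.Dict String (List Int)) :
    rows.foldl (fun d r => r.2.2.2.foldl (fun d tx => d.modify (key r tx) [] (· ++ [tx.1])) d) d
      = (rows.flatMap (fun r => r.2.2.2.map (fun tx => (key r tx, tx.1)))).foldl
          (fun d p => d.modify p.1 [] (· ++ [p.2])) d := by
  induction rows generalizing d with
  | nil => rfl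
  | cons r rs ih => simp [List.flatMap_cons, List.foldl_append, List.foldl_map, ih]

-- keys of one bStep
theorem keys_bStep (d : PySem.Dict String Int) (k : String) (v : Int) :
    (bStep d k v).keys = PySem.Set.add d.keys k := by
  unfold bStep
  cases h : d.get? k with
  | none =>
    have hc : d.contains k = false := by
      rw [PySem.Dict.contains_eq_isSome_get?, h]; rfl
    have hk : k ∉ d.keys := by
      intro hm
      rw [← PySem.Dict.contains_iff_mem_keys] at hm
      simp [hc] at hm
    rw [PySem.Dict.keys_insert_of_not_contains d v hc]
    simp only [PySem.Set.add, PySem.Set.contains_eq_listContains, List.contains_eq_mem, hk,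
      decide_false, Bool.false_eq_true, if_false]
  | some m =>
    have hc : d.contains k = true := by
      rw [PySem.Dict.contains_eq_isSome_get?, h]; rfl
    have hk : k ∈ d.keys := (PySem.Dict.contains_iff_mem_keys d k).mp hc
    have hadd : PySem.Set.add d.keys k = d.keys := by
      simp only [PySem.Set.add, PySem.Set.contains_eq_listContains, List.contains_eq_mem, hk,
        decide_true, if_true]
    dsimp only
    split_ifs with hv
    · rw [PySem.Dict.keys_insert_of_contains d v hc, hadd]
    · rw [hadd]

theorem keys_bFold (ev : List (String × Int)) (d : PySem.Dict String Int) :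
    (ev.foldl (fun d p => bStep d p.1 p.2) d).keys = PySem.Set.update d.keys (ev.map (·.1)) := by
  induction ev generalizing d with
  | nil => rfl
  | cons p ps ih =>
    simp only [List.foldl_cons, List.map_cons, PySem.Set.update_cons]
    rw [ih, keys_bStep]

-- running minimum over an option accumulator
def runMin (o : Option Int) (vs : List Int) : Option Int :=
  vs.foldl (fun o v => match o with | none => some v | some m => some (if v < m then v else m)) o

theorem runMin_some (m : Int) (vs : List Int) :
    runMin (some m) vs = some (vs.foldl (fun m v => if v < m then v else m) m) := by
  induction vs generalizing m with
  | nil => rfl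
  | cons v vs ih => simp [runMin, List.foldl_cons] at ih ⊢; exact ih _

theorem get?_bFold (ev : List (String × Int)) (d : PySem.Dict String Int) (k : String) :
    (ev.foldl (fun d p => bStep d p.1 p.2) d).get? k
      = runMin (d.get? k) ((ev.filter (·.1 == k)).map (·.2)) := by
  induction ev generalizing d with
  | nil => rfl
  | cons p ps ih =>
    obtain ⟨k', v⟩ := p
    by_cases hk : k' = k
    · subst hk
      simp only [List.foldl_cons, List.filter_cons, BEq.rfl, List.map_cons, runMin, if_true]
      rw [ih]
      congr 1
      unfold bStep
      cases h : d.get? k' with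
      | none => simp [PySem.Dict.get?_insert_self]
      | some m =>
        dsimp only
        split_ifs with hv
        · simp [PySem.Dict.get?_insert_self]
        · simp [h]
    · have hne : ((k', v).1 == k) = false := by simp [hk]
      simp only [List.foldl_cons, List.filter_cons, hne]
      rw [ih]
      congr 1
      unfold bStep
      cases h : d.get? k' with
      | none => exact PySem.Dict.get?_insert_of_ne d v (Ne.symm hk)
      | some m =>
        dsimp only
        split_ifs with hv
        · exact PySem.Dict.get?_insert_of_ne d v (Ne.symm hk)
        · rfl

-- the aggregated equality, for an arbitrary event stream
theorem fold_agree (ev : List (String × Int)) :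
    (ev.foldl (fun d p => d.modify p.1 [] (· ++ [p.2])) (PySem.Dict.empty : PySem.Dict String (List Int))).keys.map
        (fun uid => (uid, pyMin ((ev.foldl (fun d p => d.modify p.1 [] (· ++ [p.2])) (PySem.Dict.empty : PySem.Dict String (List Int))).getD uid [])))
      = (ev.foldl (fun d p => bStep d p.1 p.2) (PySem.Dict.empty : PySem.Dict String Int)).items := by
  set aD := ev.foldl (fun d p => d.modify p.1 [] (· ++ [p.2])) (PySem.Dict.empty : PySem.Dict String (List Int)) with haD
  set bD := ev.foldl (fun d p => bStep d p.1 p.2) (PySem.Dict.empty : PySem.Dict String Int) with hbD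
  have hak : aD.keys = PySem.Set.ofList (ev.map (·.1)) := by
    rw [haD, PySem.Dict.keys_foldl_modify_key ev (·.1) [] (fun d p => (· ++ [p.2])) PySem.Dict.empty]
    simp [PySem.Set.update_nil_left]
  have hbk : bD.keys = PySem.Set.ofList (ev.map (·.1)) := by
    rw [hbD, keys_bFold]
    simp [PySem.Set.update_nil_left]
  have hbnd : bD.keys.Nodup := by rw [hbk]; exact PySem.Set.nodup_ofList _
  rw [PySem.Dict.items_eq_map_keys bD hbnd 0, hak, hbk]
  apply List.map_congr_left
  intro k hk
  have hkev : k ∈ ev.map (·.1) := (PySem.Set.mem_ofList _ _).mp hk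
  -- the filtered value list is nonempty
  obtain ⟨p, hp, hpk⟩ := List.mem_map.mp hkev
  have hmemf : p ∈ ev.filter (·.1 == k) := by
    rw [List.mem_filter]; exact ⟨hp, by simp [hpk]⟩
  have hA : aD.getD k [] = (ev.filter (·.1 == k)).map (·.2) := by
    rw [haD, PySem.Dict.getD_foldl_modify_append]
    simp
  have hB : bD.get? k = runMin none ((ev.filter (·.1 == k)).map (·.2)) := by
    rw [hbD, get?_bFold]; simp
  cases hvs : (ev.filter (·.1 == k)).map (·.2) with
  | nil => exact absurd (List.mem_map_of_mem hmemf (f := (·.2))) (by simp [hvs])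
  | cons x xs =>
    have : bD.get? k = some (xs.foldl (fun m v => if v < m then v else m) x) := by
      rw [hB, hvs]
      show runMin (some x) xs = _
      exact runMin_some x xs
    rw [PySem.Dict.getD_of_get?_eq_some bD 0 this, hA, hvs]
    rfl

-- ===== VERDICT (by name: the statement is the Claim_ definition above) =====
theorem get_node_t0_spec : Claim_equal_get_node_t0 := by
  intro rows retweet save words _
  show get_node_t0 rows retweet save words = get_node_t0_alt rows retweet save words
  unfold get_node_t0 get_node_t0_alt
  cases retweet with
  | false =>
    simp only [if_neg (by simp : ¬ (false = true))]
    rw [a_pass rows (fun r tx => PySem.Int.toStr r.2.1)]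
    exact fold_agree _
  | true =>
    simp only [if_true]
    rw [a_pass rows (fun r tx => PySem.Int.toStr r.2.1),
        a_pass rows (fun r tr => PySem.Int.toStr tr.2.1),
        ← List.foldl_append]
    exact fold_agree _
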